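-- pv_equiv track=rewrite | github.com/cmh1027/bakjoon | 브루트포스/3085.py | countColCandy
-- ===== SOURCE A (Python) =====
-- def countColCandy(M, N, j):
--     maxSequence = 0
--     currentSequence = 0
--     current = -1
--     for i in range(N):
--         if M[i][j] == current:
--             currentSequence += 1
--         else:
--             if maxSequence < currentSequence:
--                 maxSequence = currentSequence
--             current = M[i][j]
--             currentSequence = 1
--     if maxSequence < currentSequence:
--         maxSequence = currentSequence
--     return maxSequence
-- ===== SOURCE B (Python) =====
-- def countColCandy(M, N, j):
--     col = [M[i][j] for i in range(N)]
--     n = len(col)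
--     bounds = [0] + [i for i in range(1, n) if col[i] != col[i - 1]] + [n]
--     return max(b - a for a, b in zip(bounds, bounds[1:]))
-- ===== Notes on version B (the rewrite author's own statement) =====
-- stated objective: alternative
-- what changed: Replaces A's streaming current/currentSequence/maxSequence state machine with a staged boundary decomposition: extract the column, list the positions where adjacent values differ, frame them with 0 and n, and return the maximum adjacent difference of that boundary list (run lengths as prefix-sum differences).
import Mathlib
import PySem

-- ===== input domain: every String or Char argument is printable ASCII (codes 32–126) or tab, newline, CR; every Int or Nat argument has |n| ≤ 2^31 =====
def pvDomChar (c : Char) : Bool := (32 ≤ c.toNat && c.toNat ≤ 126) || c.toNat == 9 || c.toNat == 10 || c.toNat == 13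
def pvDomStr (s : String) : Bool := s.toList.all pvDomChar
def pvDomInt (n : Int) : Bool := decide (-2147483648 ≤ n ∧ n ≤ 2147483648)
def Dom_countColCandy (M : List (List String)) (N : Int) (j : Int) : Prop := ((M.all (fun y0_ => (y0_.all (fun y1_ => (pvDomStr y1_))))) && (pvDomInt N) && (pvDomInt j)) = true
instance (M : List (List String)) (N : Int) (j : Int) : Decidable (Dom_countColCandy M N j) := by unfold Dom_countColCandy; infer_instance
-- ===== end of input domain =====

-- B replaces A's current/currentSequence/maxSequence state machine with a staged boundary
-- decomposition: cut positions where adjacent column values differ, framed by 0 and n, and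
-- the answer is the maximum adjacent difference of that boundary list (alternative, same O(N)).


-- ===== PORT A =====
-- Python's 'current' starts as the int -1, which never equals a string; modelled as
-- Option String with 'none' for the initial -1.  M[i][j] is ported with pyGet?; the
-- '.getD ""' default is never reached inside Pre_ (outside it Python raises IndexError).
def countColCandy (M : List (List String)) (N : Int) (j : Int) : Int :=
  let st := (PySem.List.pyRange 0 N 1).foldl
    (fun (st : Int × Int × Option String) i =>
      let v := ((PySem.List.pyGet? M i).bind (fun r => PySem.List.pyGet? r j)).getD ""
      if some v = st.2.2 then (st.1, st.2.1 + 1, st.2.2)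
      else ((if st.1 < st.2.1 then st.2.1 else st.1), 1, some v))
    (0, 0, none)
  if st.1 < st.2.1 then st.2.1 else st.1

-- ===== PORT B =====
-- Source B's cut positions: [i for i in range(1, n) if col[i] != col[i-1]]
def pvColCuts (col : List String) : List Int :=
  (PySem.List.pyRange 1 (col.length : Int) 1).filter
    (fun i => !(((PySem.List.pyGet? col i).getD "") == ((PySem.List.pyGet? col (i - 1)).getD "")))

-- Source B's boundary list [0] + cuts + [n]
def pvBounds (col : List String) : List Int := 0 :: pvColCuts col ++ [(col.length : Int)]

-- Source B's generator (b - a for a, b in zip(bounds, bounds[1:]))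
def pvDiffs (l : List Int) : List Int := (l.zip (l.drop 1)).map (fun p => p.2 - p.1)

-- column comprehension; '.getD ""' is never reached inside Pre_ (Python raises there)
def countColCandy_alt (M : List (List String)) (N : Int) (j : Int) : Int :=
  let col := (PySem.List.pyRange 0 N 1).map
    (fun i => ((PySem.List.pyGet? M i).bind (fun r => PySem.List.pyGet? r j)).getD "")
  match pvDiffs (pvBounds col) with
  | [] => 0          -- unreachable: pvBounds always has ≥ 2 elements (Python's max never sees an empty sequence)
  | d :: ds => ds.foldl max d

-- ===== PRECONDITION & SPEC =====
-- Pre_ excludes exactly the inputs where Python A raises IndexError: some accessed row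
-- index i < N is out of range of M, or the column index j is out of range of that row.
def Pre_countColCandy (M : List (List String)) (N : Int) (j : Int) : Prop :=
  N ≤ (M.length : Int) ∧ ∀ i : Nat, i < N.toNat → PySem.Raise.InRange ((M.getD i []).length) j
instance (M : List (List String)) (N : Int) (j : Int) : Decidable (Pre_countColCandy M N j) := by
  unfold Pre_countColCandy; infer_instance
def pvWitness_countColCandy : List (List String) × Int × Int := ([["a"], ["a"], ["b"]], 3, 0)

def Spec_countColCandy (M : List (List String)) (N : Int) (j : Int) (out : Int) : Prop := out = countColCandy_alt M N j
instance (M : List (List String)) (N : Int) (j : Int) (out : Int) : Decidable (Spec_countColCandy M N j out) := by unfold Spec_countColCandy; infer_instance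

-- ===== CLAIM (what is proved, stated in full; the proofs are below) =====
def Claim_equal_countColCandy : Prop := ∀ (M : List (List String)) (N : Int) (j : Int), Dom_countColCandy M N j → Pre_countColCandy M N j → Spec_countColCandy M N j (countColCandy M N j)

-- ===== LEMMAS AND PROOFS =====

-- A's loop body, on the already-extracted column value.
def pvStep (st : Int × Int × Option String) (v : String) : Int × Int × Option String :=
  if some v = st.2.2 then (st.1, st.2.1 + 1, st.2.2)
  else ((if st.1 < st.2.1 then st.2.1 else st.1), 1, some v)

-- A's state machine as a plain recursion (max so far, current run count, current value).
def pvRun : List String → Int → Int → String → Int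
  | [], m, c, _ => if m < c then c else m
  | x :: xs, m, c, v =>
      if x = v then pvRun xs m (c + 1) v
      else pvRun xs (if m < c then c else m) 1 x

-- leading elements of xs equal to v
def pvLead (v : String) : List String → Nat
  | [] => 0
  | x :: xs => if x = v then pvLead v xs + 1 else 0

-- run-by-run restatement of A's scan
def pvScan (best : Int) : List String → Int
  | [] => best
  | v :: xs =>
      let k : Int := (pvLead v xs : Int) + 1
      pvScan (if k > best then k else best) (xs.drop (pvLead v xs))
termination_by l => l.length
decreasing_by simp [List.length_drop]

-- run-length list, head-first cons recursion (the shape pvDiffs ∘ pvBounds satisfies)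
def pvRL : List String → List Int
  | [] => []
  | [_] => [1]
  | x :: y :: zs =>
      if x = y then
        match pvRL (y :: zs) with
        | [] => [1]
        | h :: t => (h + 1) :: t
      else 1 :: pvRL (y :: zs)

theorem ite_max (m c : Int) : (if m < c then c else m) = max m c := by
  rw [Int.max_def]; split_ifs <;> omega

theorem ite_max' (k b : Int) : (if k > b then k else b) = max k b := by
  rw [Int.max_def]; split_ifs <;> omega

theorem foldl_pvStep_eq_pvRun (xs : List String) :
    ∀ (m c : Int) (v : String),
      (let st := xs.foldl pvStep (m, c, some v); if st.1 < st.2.1 then st.2.1 else st.1)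
        = pvRun xs m c v := by
  induction xs with
  | nil => intro m c v; simp [pvRun]
  | cons x xs ih =>
      intro m c v
      by_cases h : x = v <;> simp [pvStep, pvRun, h, ih]

theorem pvScan_nil (b : Int) : pvScan b [] = b := by unfold pvScan; rfl

theorem pvScan_cons (b : Int) (v : String) (xs : List String) :
    pvScan b (v :: xs)
      = pvScan (max ((pvLead v xs : Int) + 1) b) (xs.drop (pvLead v xs)) := by
  conv_lhs => unfold pvScan
  show pvScan (if (pvLead v xs : Int) + 1 > b then (pvLead v xs : Int) + 1 else b) (xs.drop (pvLead v xs)) = _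
  rw [ite_max']

theorem pvRun_eq_pvScan (xs : List String) :
    ∀ (m c : Int) (v : String),
      pvRun xs m c v
        = pvScan (max m (c + (pvLead v xs : Int))) (xs.drop (pvLead v xs)) := by
  induction xs with
  | nil =>
      intro m c v
      simp only [pvRun, pvLead, List.drop_nil, Nat.cast_zero, add_zero, pvScan_nil, ite_max]
  | cons x xs ih =>
      intro m c v
      by_cases h : x = v
      · simp only [pvRun, pvLead, if_pos h, ih, List.drop_succ_cons]
        congr 1
        push_cast
        omega
      · simp only [pvRun, pvLead, if_neg h, ih, ite_max, Nat.cast_zero, add_zero,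
          List.drop_zero, pvScan_cons]
        congr 1
        omega

theorem finish_foldl_eq_pvScan (col : List String) :
    (let st := col.foldl pvStep (0, 0, none); if st.1 < st.2.1 then st.2.1 else st.1)
      = pvScan 0 col := by
  cases col with
  | nil => simp [pvScan_nil]
  | cons x xs =>
      have h1 : pvStep (0, 0, none) x = (0, 1, some x) := by simp [pvStep]
      simp only [List.foldl_cons, h1]
      rw [foldl_pvStep_eq_pvRun xs 0 1 x, pvRun_eq_pvScan xs 0 1 x, pvScan_cons]
      congr 1
      omega

-- pvRL satisfies the run recursion
theorem pvRL_run (xs : List String) : ∀ v : String,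
    pvRL (v :: xs) = ((pvLead v xs : Int) + 1) :: pvRL (xs.drop (pvLead v xs)) := by
  induction xs with
  | nil => intro v; simp [pvRL, pvLead]
  | cons y zs ih =>
      intro v
      by_cases h : y = v
      · subst h
        simp only [pvRL, ih y, pvLead]
        push_cast
        ring_nf
        rw [Nat.add_comm 1 (pvLead y zs), List.drop_succ_cons]
      · simp [pvRL, pvLead, h, Ne.symm h]

theorem pvScan_eq_fold (n : Nat) : ∀ (col : List String), col.length ≤ n → ∀ b : Int,
    pvScan b col = (pvRL col).foldl (fun b k => max k b) b := by
  induction n with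
  | zero =>
      intro col h b
      have : col = [] := List.eq_nil_of_length_eq_zero (Nat.le_zero.mp h)
      subst this; simp [pvScan_nil, pvRL]
  | succ n ih =>
      intro col h b
      cases col with
      | nil => simp [pvScan_nil, pvRL]
      | cons v xs =>
          have hlen : (xs.drop (pvLead v xs)).length ≤ n := by
            simp only [List.length_drop, List.length_cons] at *
            omega
          rw [pvScan_cons, pvRL_run, List.foldl_cons, ih _ hlen]

-- pvDiffs basic algebra
theorem pvDiffs_cons₂ (a b : Int) (t : List Int) :
    pvDiffs (a :: b :: t) = (b - a) :: pvDiffs (b :: t) := rfl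

theorem pvDiffs_map_add (c : Int) : ∀ l : List Int, pvDiffs (l.map (· + c)) = pvDiffs l := by
  intro l
  induction l with
  | nil => rfl
  | cons a t ih =>
      cases t with
      | nil => rfl
      | cons b t' =>
          show pvDiffs ((a + c) :: (b + c) :: t'.map (· + c)) = pvDiffs (a :: b :: t')
          rw [pvDiffs_cons₂, pvDiffs_cons₂]
          have hb : ((b :: t').map (· + c)) = (b + c) :: t'.map (· + c) := rfl
          rw [← hb, ih]
          congr 1
          ring

theorem pyRange_shift (a b : Int) :
    PySem.List.pyRange (a + 1) (b + 1) 1 = (PySem.List.pyRange a b 1).map (· + 1) := by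
  rw [PySem.List.pyRange_one, PySem.List.pyRange_one]
  have h : (b + 1 - (a + 1)) = b - a := by ring
  rw [h, List.map_map]
  apply List.map_congr_left
  intro k _
  simp; ring

theorem pvColCuts_single (x : String) : pvColCuts [x] = [] := by
  simp [pvColCuts, PySem.List.pyRange_one_eq_nil]

theorem pvColCuts_cons (x y : String) (zs : List String) :
    pvColCuts (x :: y :: zs)
      = (if y = x then [] else [1]) ++ (pvColCuts (y :: zs)).map (· + 1) := by
  unfold pvColCuts
  have hm : (1 : Int) ≤ ((y :: zs).length : Int) := by
    simp only [List.length_cons]; omega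
  have hlen : (((x :: y :: zs).length : Int)) = ((y :: zs).length : Int) + 1 := by
    simp only [List.length_cons]; push_cast; ring
  have hsplit : PySem.List.pyRange 1 (((y :: zs).length : Int) + 1) 1
      = [1] ++ (PySem.List.pyRange 1 ((y :: zs).length : Int) 1).map (· + 1) := by
    have e1 : PySem.List.pyRange 1 2 1 = [1] := by
      have h := PySem.List.pyRange_one_singleton (1 : Int)
      norm_num at h; exact h
    have e2 : PySem.List.pyRange 2 (((y :: zs).length : Int) + 1) 1
        = (PySem.List.pyRange 1 ((y :: zs).length : Int) 1).map (· + 1) := by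
      have h := pyRange_shift 1 ((y :: zs).length : Int)
      norm_num at h; exact h
    rw [PySem.List.pyRange_one_append 1 2 (((y :: zs).length : Int) + 1) (by omega) (by omega), e1, e2]
  rw [hlen, hsplit, List.filter_append, List.filter_map]
  congr 1
  · -- filter p [1]
    have g1 : PySem.List.pyGet? (x :: y :: zs) 1 = some y := by
      rw [PySem.List.pyGet?_of_nonneg _ (by norm_num : (0:Int) ≤ 1)]
      norm_num
    have g0 : PySem.List.pyGet? (x :: y :: zs) (1 - 1) = some x := by
      rw [show (1:Int) - 1 = 0 by ring, PySem.List.pyGet?_zero]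
      norm_num
    by_cases h : y = x <;> simp only [List.filter_cons, List.filter_nil, g1, g0, Option.getD_some, h] <;> simp [h]
  · -- shifted part
    rw [List.filter_congr]
    intro i hi
    rw [PySem.List.mem_pyRange_one] at hi
    have hA : PySem.List.pyGet? (x :: y :: zs) (i + 1) = PySem.List.pyGet? (y :: zs) i := by
      rw [PySem.List.pyGet?_of_nonneg _ (by omega : (0:Int) ≤ i + 1),
          PySem.List.pyGet?_of_nonneg _ (by omega : (0:Int) ≤ i),
          show (i + 1).toNat = i.toNat + 1 by omega]
      simp
    have hB : PySem.List.pyGet? (x :: y :: zs) (i + 1 - 1) = PySem.List.pyGet? (y :: zs) (i - 1) := by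
      rw [show i + 1 - 1 = i by ring,
          PySem.List.pyGet?_of_nonneg _ (by omega : (0:Int) ≤ i),
          PySem.List.pyGet?_of_nonneg _ (by omega : (0:Int) ≤ i - 1),
          show i.toNat = (i - 1).toNat + 1 by omega]
      simp
    simp only [Function.comp_apply, hA, hB]

-- pvDiffs ∘ pvBounds satisfies pvRL's recursion
theorem pvDif_nil : pvDiffs (pvBounds []) = [0] := by decide

theorem pvDif_single (x : String) : pvDiffs (pvBounds [x]) = [1] := by
  simp [pvBounds, pvColCuts_single, pvDiffs]

theorem pvDif_cons (x y : String) (zs : List String) :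
    pvDiffs (pvBounds (x :: y :: zs))
      = if x = y then
          (match pvDiffs (pvBounds (y :: zs)) with
            | [] => [1]
            | h :: t => (h + 1) :: t)
        else 1 :: pvDiffs (pvBounds (y :: zs)) := by
  have hlen : (((x :: y :: zs).length : Int)) = ((y :: zs).length : Int) + 1 := by
    simp only [List.length_cons]; push_cast; ring
  by_cases h : x = y
  · rw [if_pos h]
    have hb : pvBounds (x :: y :: zs)
        = 0 :: (pvColCuts (y :: zs) ++ [((y :: zs).length : Int)]).map (· + 1) := by
      unfold pvBounds
      rw [pvColCuts_cons, if_pos h.symm, List.nil_append, hlen, List.map_append]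
      rfl
    cases htb : pvColCuts (y :: zs) ++ [((y :: zs).length : Int)] with
    | nil => simp at htb
    | cons c ct =>
        have hys : pvBounds (y :: zs) = 0 :: c :: ct := by
          unfold pvBounds; rw [List.cons_append, htb]
        rw [hb, htb, List.map_cons, pvDiffs_cons₂, hys, pvDiffs_cons₂]
        have hmm : pvDiffs ((c + 1) :: ct.map (· + 1)) = pvDiffs (c :: ct) := by
          have h2 := pvDiffs_map_add 1 (c :: ct)
          simpa using h2
        rw [hmm]
        simp
  · rw [if_neg h]
    have hb : pvBounds (x :: y :: zs)
        = 0 :: 1 :: (pvColCuts (y :: zs) ++ [((y :: zs).length : Int)]).map (· + 1) := by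
      unfold pvBounds
      rw [pvColCuts_cons, if_neg (fun hyx => h hyx.symm), hlen, List.map_append]
      rfl
    rw [hb, pvDiffs_cons₂]
    have h1 : (1 : Int) :: (pvColCuts (y :: zs) ++ [((y :: zs).length : Int)]).map (· + 1)
        = ((0 :: (pvColCuts (y :: zs) ++ [((y :: zs).length : Int)])).map (· + 1)) := by
      rw [List.map_cons]; norm_num
    rw [h1, pvDiffs_map_add]
    simp [pvBounds]

theorem pvDif_eq_pvRL : ∀ col : List String, col ≠ [] → pvDiffs (pvBounds col) = pvRL col := by
  intro col
  induction col with
  | nil => intro h; exact absurd rfl h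
  | cons x ys ih =>
      intro _
      cases ys with
      | nil => rw [pvDif_single]; rfl
      | cons y zs =>
          rw [pvDif_cons, ih (by simp)]
          by_cases h : x = y <;> simp [pvRL, h]

theorem foldl_max_comm (l : List Int) : ∀ b : Int,
    l.foldl (fun b k => max k b) b = l.foldl max b := by
  induction l with
  | nil => intro b; rfl
  | cons a t _ih => intro b; simp [List.foldl_cons, max_comm]

theorem main_col (col : List String) :
    (let st := col.foldl pvStep (0, 0, none); if st.1 < st.2.1 then st.2.1 else st.1)
      = (match pvDiffs (pvBounds col) with
          | [] => 0
          | d :: ds => ds.foldl max d) := by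
  rw [finish_foldl_eq_pvScan, pvScan_eq_fold col.length col (Nat.le_refl _)]
  cases col with
  | nil => rw [pvDif_nil]; simp [pvRL]
  | cons v xs =>
      rw [pvDif_eq_pvRL _ (by simp), pvRL_run]
      have h1 : max ((pvLead v xs : Int) + 1) 0 = (pvLead v xs : Int) + 1 := by
        apply max_eq_left; positivity
      simp only [List.foldl_cons]
      rw [h1, foldl_max_comm]

-- ===== VERDICT (by name: the statement is the Claim_ definition above) =====
theorem countColCandy_spec : Claim_equal_countColCandy := by
  intro M N j _ _
  unfold Spec_countColCandy countColCandy countColCandy_alt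
  have hstep : (fun (st : Int × Int × Option String) (i : Int) =>
      let v := ((PySem.List.pyGet? M i).bind (fun r => PySem.List.pyGet? r j)).getD ""
      if some v = st.2.2 then (st.1, st.2.1 + 1, st.2.2)
      else ((if st.1 < st.2.1 then st.2.1 else st.1), 1, some v))
      = (fun st i => pvStep st (((PySem.List.pyGet? M i).bind (fun r => PySem.List.pyGet? r j)).getD "")) := rfl
  rw [hstep, ← List.foldl_map]
  exact main_col _
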